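-- pv_equiv track=rewrite | github.com/dem-ola/examples | scrape.py | remove_list_of_numbers
-- ===== SOURCE A (Python) =====
-- from collections import Counter, defaultdict
--
-- def get_rows_with_integers(list_):
-- 	''' get rows where items are integers '''
-- 	rows, ints = [],[]
-- 	for i in range(len(list_)):
-- 		try:
-- 			ints.append(int(list_[i]))
-- 			rows.append(i)
-- 		except:
-- 			continue
-- 	return rows, ints
--
-- def get_consecutive_int_rows(list_):
-- 	''' get grouped rows with integer items '''
--
-- 	groups, r_group, i_group = defaultdict(dict), [], []
-- 	g_num, last_r = 1, None
--
-- 	# add improbable last row so the last group can be captured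
-- 	improbable = 999999
-- 	list_.append(improbable)
--
-- 	# get list of rows with integers
-- 	rows, ints = get_rows_with_integers(list_)
--
-- 	# parse for consecutive rows
-- 	for r, i in zip(rows, ints):
--
-- 		if not r_group: #new group
-- 			r_group.append(r)
-- 			i_group.append(i)
-- 			last_r = r
--
-- 		else:
--
-- 			# add to group if consecutive
-- 			if r - last_r == 1 and i != improbable:
-- 				r_group.append(r)
-- 				i_group.append(i)
--
-- 			else:
-- 				# save group and reset
-- 				groups[g_num]['rows'] = r_group
-- 				groups[g_num]['ints'] = i_group
-- 				g_num += 1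
--
-- 				r_group, i_group = [], []
-- 				r_group.append(r)
-- 				i_group.append(i)
--
-- 			last_r = r
--
-- 	list_.pop() # remove the improbable
--
-- 	return groups
--
-- def remove_list_of_numbers(doclist,**kwargs):
-- 	''' remove list of numbers '''
--
-- 	del_ = []
-- 	consec_dict = get_consecutive_int_rows(doclist)
--
-- 	for k, group in consec_dict.items():
-- 		if len(group['rows']) == 1:
-- 			continue
-- 		else:
-- 			del_.extend(group['rows'])
--
-- 	# delete lines if necessary
-- 	if del_:
-- 		del_.sort()
-- 		for i in range(len(del_)):
-- 			del doclist[max(del_)]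
-- 			del_.pop()
--
-- 	return doclist
-- ===== SOURCE B (Python) =====
-- def remove_list_of_numbers(doclist, **kwargs):
--     ''' remove list of numbers: drop every line that parses as an int and has an
--     int-parsing neighbour (i.e. every run of >=2 consecutive integer lines);
--     one pass, no sorting, no repeated max() scans; mutates doclist in place like A '''
--     flags = []
--     for s in doclist:
--         try:
--             int(s)
--             flags.append(True)
--         except ValueError:
--             flags.append(False)
--     n = len(flags)
--     doclist[:] = [doclist[i] for i in range(n)
--                   if not (flags[i] and ((i > 0 and flags[i - 1])
--                                         or (i + 1 < n and flags[i + 1])))]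
--     return doclist
-- ===== Notes on version B (the rewrite author's own statement) =====
-- stated objective: simpler
-- what changed: B replaces A's group-dictionary construction, sort and repeated max()-scan-and-delete loop by a single local rule: parse each line once and keep line i unless it is an integer with an integer neighbour (runs of >=2 consecutive integer lines are dropped in one pass).
-- intended difference: On lists where some line parses to A's 'improbable' sentinel 999999 in a position where A's run-splitting leaves a one-line group, A keeps the lines of such singleton groups (its sentinel collides with document content) while B deletes every full run of >=2 consecutive integer lines, which is the function's stated purpose. — e.g. on remove_list_of_numbers(["1", "999999"]): A returns ["1", "999999"], B returns []
import Mathlib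
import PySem

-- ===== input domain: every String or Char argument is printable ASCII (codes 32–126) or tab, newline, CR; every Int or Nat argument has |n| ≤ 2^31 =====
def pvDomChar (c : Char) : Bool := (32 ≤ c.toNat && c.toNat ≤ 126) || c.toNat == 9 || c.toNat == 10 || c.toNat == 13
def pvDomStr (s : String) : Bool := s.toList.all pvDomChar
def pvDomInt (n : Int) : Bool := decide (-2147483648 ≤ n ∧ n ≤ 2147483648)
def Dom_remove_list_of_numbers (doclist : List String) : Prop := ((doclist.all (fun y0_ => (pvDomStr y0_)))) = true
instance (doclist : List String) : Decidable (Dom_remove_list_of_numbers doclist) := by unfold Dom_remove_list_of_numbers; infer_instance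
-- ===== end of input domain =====

-- B replaces A's group-dict + sort + repeated max()-scan deletion by one local pass
-- (drop integer lines with an integer neighbour); A mutates doclist in place, B performs
-- the same in-place replacement, and the equivalence proved here is about the return value.

-- ===== PORT A =====

-- get_rows_with_integers: for i in range(len(list_)): try int(list_[i]) …
-- (pyGetD default "" is unreachable: i ranges over valid indices)
def pvGetRowsWithIntegers (list_ : List String) : List Int × List Int :=
  (PySem.List.pyRange 0 (PySem.List.len list_) 1).foldl
    (fun (acc : List Int × List Int) i =>
      match PySem.Int.ofStr? (PySem.List.pyGetD list_ i "") with
      | some v => (acc.1 ++ [i], acc.2 ++ [v])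
      | none => acc)
    ([], [])

structure PvGState where
  groups : PySem.Dict Int (PySem.Dict String (List Int))
  r_group : List Int
  i_group : List Int
  g_num : Int
  last_r : Option Int

-- one iteration of the 'for r, i in zip(rows, ints)' loop
-- (last_r.getD 0 is unreachable as a default: last_r is set whenever r_group ≠ [])
def pvGStep (st : PvGState) (p : Int × Int) : PvGState :=
  if st.r_group = [] then
    { st with r_group := st.r_group ++ [p.1], i_group := st.i_group ++ [p.2],
              last_r := some p.1 }
  else if p.1 - (st.last_r.getD 0) = 1 ∧ p.2 ≠ 999999 then
    { st with r_group := st.r_group ++ [p.1], i_group := st.i_group ++ [p.2],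
              last_r := some p.1 }
  else
    let g1 := st.groups.insert st.g_num
                ((st.groups.getD st.g_num PySem.Dict.empty).insert "rows" st.r_group)
    let g2 := g1.insert st.g_num
                ((g1.getD st.g_num PySem.Dict.empty).insert "ints" st.i_group)
    { groups := g2, r_group := [p.1], i_group := [p.2],
      g_num := st.g_num + 1, last_r := some p.1 }

-- get_consecutive_int_rows: list_.append(999999) is modelled by appending the string
-- "999999" — the appended element is only ever passed to int(), and int("999999") = 999999;
-- the final list_.pop() restores the list and does not affect the return value.
def pvGetConsecutiveIntRows (list_ : List String) :
    PySem.Dict Int (PySem.Dict String (List Int)) :=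
  let list' := list_ ++ ["999999"]
  let ri := pvGetRowsWithIntegers list'
  let st := (ri.1.zip ri.2).foldl pvGStep ⟨PySem.Dict.empty, [], [], 1, none⟩
  st.groups

-- the 'for i in range(len(del_)): del doclist[max(del_)]; del_.pop()' loop
-- (the 'none' fallbacks are unreachable: Python would raise there)
def pvDelLoop : Nat → List String → List Int → List String
  | 0, doc, _ => doc
  | k+1, doc, d =>
      match PySem.List.max? d (fun x => x) with
      | none => doc
      | some m =>
        let doc' := match PySem.List.pop? doc m with
          | some pr => pr.2
          | none => doc
        match PySem.List.pop? d (-1) with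
        | some pr => pvDelLoop k doc' pr.2
        | none => pvDelLoop k doc' d

def remove_list_of_numbers (doclist : List String) : List String :=
  let consec := pvGetConsecutiveIntRows doclist
  let del_ := consec.items.foldl
    (fun (acc : List Int) kv =>
      if (PySem.Dict.getD kv.2 "rows" []).length = 1 then acc
      else acc ++ PySem.Dict.getD kv.2 "rows" []) []
  if del_ ≠ [] then
    let dsorted := PySem.List.sorted del_ (fun x => x) false
    pvDelLoop dsorted.length doclist dsorted
  else doclist

-- ===== PORT B =====

def remove_list_of_numbers_alt (doclist : List String) : List String :=
  let flags := doclist.map (fun s => (PySem.Int.ofStr? s).isSome)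
  let n := flags.length
  (List.range n).filterMap (fun i =>
    if flags.getD i false ∧
       ((0 < i ∧ flags.getD (i - 1) false) ∨ (i + 1 < n ∧ flags.getD (i + 1) false))
    then none else doclist[i]?)

-- ===== PRECONDITION & SPEC =====

-- On lists where some line parses to A's 'improbable' sentinel 999999 in a position where
-- A's run-splitting leaves a one-line group, A keeps lines of such singleton groups (its
-- sentinel collides with document content) while B deletes every full run of >=2 consecutive
-- integer lines, which is the function's stated purpose.
def D_remove_list_of_numbers (doclist : List String) : Prop :=
  let w := none :: doclist.map PySem.Int.ofStr? ++ [none]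
  ∃ t ∈ w.zip (w.tail.zip w.tail.tail),
    if t.1 = none then t.2.1.isSome ∧ t.2.2 = some 999999
    else t.2.1 = some 999999 ∧ t.2.2.getD 999999 = 999999

instance (doclist : List String) : Decidable (D_remove_list_of_numbers doclist) := by
  unfold D_remove_list_of_numbers; infer_instance

def Spec_remove_list_of_numbers (doclist : List String) (out : List String) : Prop :=
  ¬ D_remove_list_of_numbers doclist → out = remove_list_of_numbers_alt doclist
instance (doclist : List String) (out : List String) : Decidable (Spec_remove_list_of_numbers doclist out) := by unfold Spec_remove_list_of_numbers; infer_instance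

def pvDiffWitness_remove_list_of_numbers : List String := ["1", "999999"]
def pvDiffWitnessOut_remove_list_of_numbers : (List String) × (List String) :=
  (["1", "999999"], [])

-- ===== CLAIM (what is proved, stated in full; the proofs are below) =====
def Claim_unchanged_remove_list_of_numbers : Prop := ∀ (doclist : List String), Dom_remove_list_of_numbers doclist → Spec_remove_list_of_numbers doclist (remove_list_of_numbers doclist)
def Claim_changed_remove_list_of_numbers : Prop := Dom_remove_list_of_numbers (pvDiffWitness_remove_list_of_numbers) ∧ D_remove_list_of_numbers (pvDiffWitness_remove_list_of_numbers) ∧ remove_list_of_numbers (pvDiffWitness_remove_list_of_numbers) = pvDiffWitnessOut_remove_list_of_numbers.1 ∧ remove_list_of_numbers_alt (pvDiffWitness_remove_list_of_numbers) = pvDiffWitnessOut_remove_list_of_numbers.2 ∧ pvDiffWitnessOut_remove_list_of_numbers.1 ≠ pvDiffWitnessOut_remove_list_of_numbers.2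
def Claim_exact_remove_list_of_numbers : Prop := ∀ (doclist : List String), Dom_remove_list_of_numbers doclist → D_remove_list_of_numbers doclist → remove_list_of_numbers doclist ≠ remove_list_of_numbers_alt doclist

-- ===== LEMMAS AND PROOFS =====

def pvPairs (l : List String) : List (Int × Int) :=
  (PySem.List.enumerate l 0).filterMap
    (fun p => (PySem.Int.ofStr? p.2).map (fun v => (p.1, v)))

-- L6a

theorem mem_pvPairs (l : List String) (q : Int × Int) :
    q ∈ pvPairs l ↔ ∃ k : Nat, ∃ _ : k < l.length,
      q.1 = (k : Int) ∧ PySem.Int.ofStr? l[k] = some q.2 := by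
  simp only [pvPairs, List.mem_filterMap, PySem.List.mem_enumerate_iff]
  constructor
  · rintro ⟨p, ⟨k, hk, rfl⟩, hf⟩
    simp only [Option.map_eq_some_iff] at hf
    obtain ⟨v, hv, rfl⟩ := hf
    exact ⟨k, hk, by simp, by simp [hv]⟩
  · rintro ⟨k, hk, h1, h2⟩
    refine ⟨((k : Int), l[k]), ⟨k, hk, by simp⟩, ?_⟩
    rw [h2]; simp [← h1]

-- L6b

theorem pairwise_pvPairs (l : List String) :
    (pvPairs l).Pairwise (fun p q => p.1 < q.1) := by
  rw [pvPairs, List.pairwise_filterMap]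
  refine (PySem.List.pairwise_lt_enumerate l 0).imp ?_
  rintro a b hab x hx y hy
  simp only [Option.map_eq_some_iff] at hx hy
  obtain ⟨v, -, rfl⟩ := hx; obtain ⟨w, -, rfl⟩ := hy
  exact hab

-- L5

theorem pvPairs_append_sentinel (l : List String) :
    pvPairs (l ++ ["999999"]) = pvPairs l ++ [((l.length : Int), 999999)] := by
  unfold pvPairs
  rw [PySem.List.enumerate_append, List.filterMap_append]
  congr 1
  show List.filterMap _ (PySem.List.enumerate ["999999"] (0 + l.length)) = _
  have : PySem.Int.ofStr? "999999" = some 999999 := by decide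
  simp [PySem.List.enumerate, this]

theorem foldl_pairs_aux (ps : List (Int × String)) (a b : List Int) :
    ps.foldl (fun (acc : List Int × List Int) p =>
      match PySem.Int.ofStr? p.2 with
      | some v => (acc.1 ++ [p.1], acc.2 ++ [v])
      | none => acc) (a, b)
    = (a ++ (ps.filterMap (fun p => (PySem.Int.ofStr? p.2).map (fun v => (p.1, v)))).map (·.1),
       b ++ (ps.filterMap (fun p => (PySem.Int.ofStr? p.2).map (fun v => (p.1, v)))).map (·.2)) := by
  induction ps generalizing a b with
  | nil => simp
  | cons p ps ih =>
    simp only [List.foldl_cons, List.filterMap_cons]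
    cases h : PySem.Int.ofStr? p.2 with
    | none => simpa [h] using ih a b
    | some v => simpa [h] using ih (a ++ [p.1]) (b ++ [v])

-- L1

theorem getRows_eq (l : List String) :
    pvGetRowsWithIntegers l = ((pvPairs l).map (·.1), (pvPairs l).map (·.2)) := by
  unfold pvGetRowsWithIntegers pvPairs
  rw [PySem.List.enumerate_eq_map_pyRange (d := "")]
  rw [List.filterMap_map]
  have h := foldl_pairs_aux ((PySem.List.pyRange 0 (PySem.List.len l) 1).map
      (fun j => (j, PySem.List.pyGetD l j ""))) [] []
  rw [List.foldl_map] at h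
  simpa using h

-- L2

theorem zip_pvPairs (l : List String) :
    ((pvPairs l).map (·.1)).zip ((pvPairs l).map (·.2)) = pvPairs l := by
  rw [List.zip_map']
  simp

def pvSegs : List Int → Int → List (Int × Int) → List (List Int)
  | cur, _, [] => [cur]
  | cur, last, p :: ps =>
      if p.1 - last = 1 ∧ p.2 ≠ 999999 then pvSegs (cur ++ [p.1]) p.1 ps
      else cur :: pvSegs [p.1] p.1 ps

def pvRowsOf (kv : Int × PySem.Dict String (List Int)) : List Int :=
  PySem.Dict.getD kv.2 "rows" []

-- saving a group appends (g_num, dict-with-rows=cur) to items, keeps keys fresh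

theorem pvSave_items (G : PySem.Dict Int (PySem.Dict String (List Int))) (g : Int)
    (cur icur : List Int) (hfresh : ∀ k ∈ G.keys, k < g) :
    (((G.insert g ((G.getD g PySem.Dict.empty).insert "rows" cur)).insert g
        (((G.insert g ((G.getD g PySem.Dict.empty).insert "rows" cur)).getD g
            PySem.Dict.empty).insert "ints" icur)).items.map pvRowsOf)
      = G.items.map pvRowsOf ++ [cur] := by
  have hnc : G.contains g = false := by
    by_contra h
    have : G.contains g = true := by simpa using h
    exact absurd ((PySem.Dict.contains_iff_mem_keys G g).mp this) (fun hm => lt_irrefl g (hfresh g hm))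
  have h1 : (G.insert g ((G.getD g PySem.Dict.empty).insert "rows" cur)).items
      = G.items ++ [(g, (G.getD g PySem.Dict.empty).insert "rows" cur)] :=
    PySem.Dict.items_insert_of_not_contains G _ hnc
  have hc2 : (G.insert g ((G.getD g PySem.Dict.empty).insert "rows" cur)).contains g = true := by
    simp [PySem.Dict.contains_insert_self]
  rw [PySem.Dict.items_insert_of_contains _ _ hc2, h1]
  simp only [List.map_append, List.map_map]
  congr 1
  · apply List.map_congr_left
    intro p hp
    have hpk : p.1 ∈ G.keys := by
      simp only [PySem.Dict.keys]; exact List.mem_map_of_mem hp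
    have hne : (p.1 == g) = false := by
      simp only [beq_eq_false_iff_ne, ne_eq]
      intro h; exact lt_irrefl g (h ▸ hfresh p.1 hpk)
    simp [Function.comp, hne]
  · simp only [List.map_cons, List.map_nil, Function.comp, beq_self_eq_true, if_pos, pvRowsOf]
    congr 1
    rw [PySem.Dict.getD_insert_self]
    rw [PySem.Dict.getD_insert_of_ne _ _ _ (by decide),
        PySem.Dict.getD_insert_self]

theorem pvSave_keys (G : PySem.Dict Int (PySem.Dict String (List Int))) (g : Int)
    (cur icur : List Int) (hfresh : ∀ k ∈ G.keys, k < g) (_hnd : G.keys.Nodup) :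
    (((G.insert g ((G.getD g PySem.Dict.empty).insert "rows" cur)).insert g
        (((G.insert g ((G.getD g PySem.Dict.empty).insert "rows" cur)).getD g
            PySem.Dict.empty).insert "ints" icur)).keys = G.keys ++ [g]) := by
  have hnc : G.contains g = false := by
    by_contra h
    have : G.contains g = true := by simpa using h
    exact absurd ((PySem.Dict.contains_iff_mem_keys G g).mp this) (fun hm => lt_irrefl g (hfresh g hm))
  have h1 := PySem.Dict.keys_insert_of_not_contains G ((G.getD g PySem.Dict.empty).insert "rows" cur) hnc
  have hc2 : (G.insert g ((G.getD g PySem.Dict.empty).insert "rows" cur)).contains g = true := by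
    simp [PySem.Dict.contains_insert_self]
  rw [PySem.Dict.keys_insert_of_contains _ _ hc2, h1]

-- L3: the zip-loop from a running-group state, with the sentinel pair appended

theorem pvLoop_eq (ps : List (Int × Int)) (r0 : Int)
    (G : PySem.Dict Int (PySem.Dict String (List Int))) (cur icur : List Int)
    (g last : Int) (hcur : cur ≠ []) (hfresh : ∀ k ∈ G.keys, k < g) (hnd : G.keys.Nodup) :
    ((ps ++ [(r0, (999999 : Int))]).foldl pvGStep
        ⟨G, cur, icur, g, some last⟩).groups.items.map pvRowsOf
      = G.items.map pvRowsOf ++ pvSegs cur last ps := by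
  induction ps generalizing G cur icur g last with
  | nil =>
    simp only [List.nil_append, List.foldl_cons, List.foldl_nil, pvSegs]
    have hns : ¬((r0 : Int) - (Option.getD (some last) 0) = 1 ∧ (999999 : Int) ≠ 999999) := by
      simp
    rw [pvGStep, if_neg hcur, if_neg hns]
    simpa using pvSave_items G g cur icur hfresh
  | cons p ps ih =>
    simp only [List.cons_append, List.foldl_cons, pvSegs]
    by_cases hc : p.1 - last = 1 ∧ p.2 ≠ 999999
    · rw [pvGStep, if_neg hcur]
      simp only [Option.getD_some]
      rw [if_pos (by simpa using hc)]
      rw [if_pos hc]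
      exact ih G (cur ++ [p.1]) (icur ++ [p.2]) g p.1 (by simp) hfresh hnd
    · rw [pvGStep, if_neg hcur]
      simp only [Option.getD_some]
      rw [if_neg (by simpa using hc)]
      rw [if_neg hc]
      have hitems := pvSave_items G g cur icur hfresh
      have hkeys := pvSave_keys G g cur icur hfresh hnd
      set G2 := ((G.insert g ((G.getD g PySem.Dict.empty).insert "rows" cur)).insert g
        (((G.insert g ((G.getD g PySem.Dict.empty).insert "rows" cur)).getD g
            PySem.Dict.empty).insert "ints" icur)) with hG2
      have hfresh2 : ∀ k ∈ G2.keys, k < g + 1 := by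
        rw [hkeys]; intro k hk
        rcases List.mem_append.mp hk with h | h
        · exact lt_trans (hfresh k h) (by omega)
        · simp at h; omega
      have hnd2 : G2.keys.Nodup := by
        rw [hkeys]
        refine List.Nodup.append hnd (List.nodup_singleton g) ?_
        intro k hk hk2
        simp at hk2
        exact absurd (hfresh k hk) (by simp [hk2])
      have := ih G2 [p.1] [p.2] (g + 1) p.1 (by simp) hfresh2 hnd2
      rw [this, hitems, List.append_assoc]
      simp

def pvKept (ps : List (Int × Int)) : List Int :=
  match ps with
  | [] => []
  | p :: rest => ((pvSegs [p.1] p.1 rest).filter (fun c => c.length ≠ 1)).flatten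

-- groups of the whole pipeline (A's zip-loop from the initial state)

theorem pvLoopTop_eq (ps : List (Int × Int)) (r0 : Int) :
    ((ps ++ [(r0, (999999 : Int))]).foldl pvGStep
        ⟨PySem.Dict.empty, [], [], 1, none⟩).groups.items.map pvRowsOf
      = (match ps with | [] => [] | p :: rest => pvSegs [p.1] p.1 rest) := by
  cases ps with
  | nil =>
    simp only [List.nil_append, List.foldl_cons, List.foldl_nil]
    rw [pvGStep]
    simp [PySem.Dict.empty]
  | cons p rest =>
    simp only [List.cons_append, List.foldl_cons]
    rw [pvGStep]
    simp only [if_pos rfl]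
    have := pvLoop_eq rest r0 PySem.Dict.empty [p.1] [p.2] 1 p.1 (by simp)
      (by simp [PySem.Dict.empty, PySem.Dict.keys]) (by simp [PySem.Dict.empty, PySem.Dict.keys])
    simpa [PySem.Dict.empty] using this

-- L4: the del_-building fold over the items

theorem pvDelFold_eq (items : List (Int × PySem.Dict String (List Int))) (a : List Int) :
    items.foldl (fun (acc : List Int) kv =>
        if (PySem.Dict.getD kv.2 "rows" []).length = 1 then acc
        else acc ++ PySem.Dict.getD kv.2 "rows" []) a
      = a ++ ((items.map pvRowsOf).filter (fun c => c.length ≠ 1)).flatten := by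
  induction items generalizing a with
  | nil => simp
  | cons kv items ih =>
    simp only [List.foldl_cons, List.map_cons, List.filter_cons]
    by_cases h : (PySem.Dict.getD kv.2 "rows" []).length = 1
    · rw [if_pos h, ih]
      simp [pvRowsOf, h]
    · rw [if_neg h, ih]
      simp [pvRowsOf, h]

-- L7

theorem flatten_pvSegs (ps : List (Int × Int)) (cur : List Int) (last : Int) :
    (pvSegs cur last ps).flatten = cur ++ ps.map (·.1) := by
  induction ps generalizing cur last with
  | nil => simp [pvSegs]
  | cons p ps ih =>
    rw [pvSegs]
    by_cases h : p.1 - last = 1 ∧ p.2 ≠ 999999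
    · rw [if_pos h, ih]; simp
    · rw [if_neg h]; simp [ih]

-- L8

theorem pvKept_sublist (ps : List (Int × Int)) :
    List.Sublist (pvKept ps) (ps.map (·.1)) := by
  cases ps with
  | nil => simp [pvKept]
  | cons p rest =>
    have h1 : List.Sublist (pvKept (p :: rest)) (pvSegs [p.1] p.1 rest).flatten :=
      List.Sublist.flatten List.filter_sublist
    rw [flatten_pvSegs] at h1
    simpa using h1

def pvKeep (doc : List String) (d : List Int) : List String :=
  (List.range doc.length).filterMap (fun (k : Nat) => if (k : Int) ∈ d then none else doc[k]?)

theorem pvKeep_nil (doc : List String) : pvKeep doc [] = doc := by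
  induction doc using List.reverseRecOn with
  | nil => simp [pvKeep]
  | append_singleton xs x ih =>
    simp only [pvKeep] at *
    rw [List.length_append, List.length_singleton, List.range_add, List.filterMap_append,
      List.filterMap_map]
    have h0 : ∀ k ∈ List.range xs.length,
        (if (k : Int) ∈ ([] : List Int) then none else (xs ++ [x])[k]?)
          = (if (k : Int) ∈ ([] : List Int) then none else xs[k]?) := by
      intro k hk
      simp only [List.mem_range] at hk
      rw [List.getElem?_append_left hk]
    rw [List.filterMap_congr h0, ih]
    simp

-- removing the last (max) index

theorem pvKeep_erase (doc : List String) (ds : List Int) (m : Nat) (hm : m < doc.length)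
    (hds : ∀ i ∈ ds, i < (m : Int)) :
    pvKeep (doc.eraseIdx m) ds = pvKeep doc (ds ++ [(m : Int)]) := by
  unfold pvKeep
  rw [List.length_eraseIdx_of_lt hm]
  have h2 : doc.length - 1 = m + (doc.length - (m+1)) := by omega
  have h1 : doc.length = (m + 1) + (doc.length - (m+1)) := by omega
  generalize hq : doc.length - (m+1) = q at h1 h2
  rw [h2, List.range_add, h1, List.range_add]
  rw [List.filterMap_append, List.filterMap_append, List.filterMap_map, List.filterMap_map]
  congr 1
  · -- first m+1 indices vs first m
    have : List.range (m+1) = List.range m ++ [m] := by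
      simpa using (List.range_add (n := m) (m := 1))
    rw [this, List.filterMap_append]
    have hlast : List.filterMap (fun (k : Nat) => if (k : Int) ∈ ds ++ [(m : Int)] then none else doc[k]?) [m]
        = [] := by simp
    rw [hlast, List.append_nil]
    apply List.filterMap_congr
    intro k hk
    simp only [List.mem_range] at hk
    have h1 : ((k : Int) ∈ ds ++ [(m:Int)]) ↔ ((k:Int) ∈ ds) := by
      simp only [List.mem_append, List.mem_singleton]
      constructor
      · rintro (h | h)
        · exact h
        · exfalso; omega
      · exact Or.inl
    rw [List.getElem?_eraseIdx, if_pos hk]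
    by_cases hmem : (k : Int) ∈ ds
    · simp [hmem, h1]
    · simp only [hmem, if_neg, if_false]
      split_ifs with h2
      · exact absurd (h1.mp h2) hmem
      · rfl
  · apply List.filterMap_congr
    intro j hj
    have hds1 : ((m + j : Nat) : Int) ∈ ds ↔ False := by
      simp only [iff_false]
      intro h
      have := hds _ h
      omega
    have hds2 : (((m + 1) + j : Nat) : Int) ∈ ds ++ [(m : Int)] ↔ False := by
      simp only [List.mem_append, List.mem_singleton, iff_false]
      rintro (h | h)
      · have := hds _ h; omega
      · omega
    simp only [Function.comp_apply]
    simp only [hds1, hds2, if_false]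
    rw [List.getElem?_eraseIdx, if_neg (by omega)]
    congr 1
    omega

theorem pvDelLoop_eq (d : List Int) : ∀ doc : List String, d.Pairwise (· < ·) →
    (∀ i ∈ d, ∃ k : Nat, i = (k : Int) ∧ k < doc.length) →
    pvDelLoop d.length doc d = pvKeep doc d := by
  induction d using List.reverseRecOn with
  | nil => intro doc _ _; rw [pvKeep_nil]; rfl
  | append_singleton ds x ih =>
    intro doc hpw hbd
    obtain ⟨hpds, -, hlt⟩ := List.pairwise_append.mp hpw
    have hltx : ∀ i ∈ ds, i < x := fun i hi => hlt i hi x (List.mem_singleton_self x)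
    obtain ⟨k, hk1, hk2⟩ := hbd x (by simp)
    subst hk1
    rw [List.length_append, List.length_singleton, pvDelLoop]
    cases hmax : PySem.List.max? (ds ++ [(k : Int)]) (fun y => y) with
    | none =>
      exfalso
      rw [PySem.List.max?_eq_none_iff] at hmax
      simp at hmax
    | some m =>
      have hmem := PySem.List.max?_mem hmax
      have hge := PySem.List.max?_isMax hmax (k : Int) (by simp)
      have hmx : m = (k : Int) := by
        rcases List.mem_append.mp hmem with h | h
        · exact absurd hge (not_le.mpr (hltx m h))
        · simpa using h
      subst hmx
      dsimp only
      rw [PySem.List.pop?_natCast doc k hk2]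
      dsimp only
      rw [PySem.List.pop?_last ds ((k : Nat) : Int)]
      dsimp only
      have hbds : ∀ i ∈ ds, ∃ j : Nat, i = (j : Int) ∧ j < (doc.eraseIdx k).length := by
        intro i hi
        obtain ⟨j, hj1, hj2⟩ := hbd i (List.mem_append_left _ hi)
        refine ⟨j, hj1, ?_⟩
        have := hltx i hi
        rw [List.length_eraseIdx_of_lt hk2]
        omega
      have := ih (doc.eraseIdx k) hpds hbds
      simp only [this]
      exact pvKeep_erase doc ds k hk2 hltx

def pvCont (last : Int) : List (Int × Int) → Prop
  | [] => False
  | p :: _ => p.1 = last + 1 ∧ p.2 ≠ 999999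

-- uniqueness of the value at a given row, and positivity of rows after a bound

theorem pv_head_min {p : Int × Int} {ps : List (Int × Int)}
    (h : (p :: ps).Pairwise (fun a b => a.1 < b.1)) {x w : Int}
    (hx : (x, w) ∈ ps) : p.1 < x := by
  rcases List.pairwise_cons.mp h with ⟨hp, -⟩
  simpa using hp _ hx

-- the head of ps continues the group ending at p iff p has a non-999999 successor row

theorem pv_notSE_iff_cont (p : Int × Int) (ps : List (Int × Int))
    (hps : (p :: ps).Pairwise (fun a b => a.1 < b.1)) :
    ((∃ w, (p.1 + 1, w) ∈ ps) ∧ ¬((p.1 + 1, (999999 : Int)) ∈ ps)) ↔ pvCont p.1 ps := by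
  cases ps with
  | nil => simp [pvCont]
  | cons q qs =>
    obtain ⟨q1, q2⟩ := q
    have hmin : ∀ x w, (x, w) ∈ qs → q1 < x := fun x w hx => by
      simpa using pv_head_min (List.pairwise_cons.mp hps).2 hx
    have hpq : p.1 < q1 := by
      simpa using (List.pairwise_cons.mp hps).1 _ List.mem_cons_self
    simp only [pvCont, List.mem_cons, Prod.mk.injEq]
    constructor
    · rintro ⟨⟨w, hw | hw⟩, hn⟩
      · obtain ⟨h1, h2⟩ := hw
        refine ⟨h1.symm, ?_⟩
        intro h999
        exact hn (Or.inl ⟨h1, h999.symm⟩)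
      · exfalso; have := hmin _ _ hw; omega
    · rintro ⟨h1, h2⟩
      refine ⟨⟨q2, Or.inl ⟨by omega, rfl⟩⟩, ?_⟩
      rintro (⟨-, h⟩ | h)
      · exact h2 h.symm
      · have := hmin _ _ h; omega

def pvClause (last i : Int) (ps : List (Int × Int)) : Prop :=
  (¬(i - 1 = last ∨ ∃ w, (i - 1, w) ∈ ps) ∨ (i, (999999 : Int)) ∈ ps) ∧
  (¬(∃ w, (i + 1, w) ∈ ps) ∨ (i + 1, (999999 : Int)) ∈ ps)

theorem pv_clause_shift (p : Int × Int) (ps : List (Int × Int)) (last i : Int)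
    (hps : (p :: ps).Pairwise (fun a b => a.1 < b.1))
    (hne : i - 1 ≠ last) (hi : p.1 < i) :
    pvClause p.1 i ps ↔ pvClause last i (p :: ps) := by
  have e1 : (i - 1 = p.1 ∨ ∃ w, (i - 1, w) ∈ ps) ↔ (i - 1 = last ∨ ∃ w, (i - 1, w) ∈ p :: ps) := by
    simp only [List.mem_cons]
    constructor
    · rintro (h | ⟨w, hw⟩)
      · exact Or.inr ⟨p.2, Or.inl (by rw [h])⟩
      · exact Or.inr ⟨w, Or.inr hw⟩
    · rintro (h | ⟨w, hw | hw⟩)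
      · omega
      · left; rw [← hw]
      · exact Or.inr ⟨w, hw⟩
  have e2 : ((i, (999999 : Int)) ∈ ps) ↔ ((i, (999999 : Int)) ∈ p :: ps) := by
    simp only [List.mem_cons]
    constructor
    · exact Or.inr
    · rintro (h | h)
      · exfalso; rw [← h] at hi; simp at hi
      · exact h
  have e3 : (∃ w, (i + 1, w) ∈ ps) ↔ (∃ w, (i + 1, w) ∈ p :: ps) := by
    simp only [List.mem_cons]
    constructor
    · rintro ⟨w, hw⟩; exact ⟨w, Or.inr hw⟩
    · rintro ⟨w, hw | hw⟩
      · exfalso; rw [← hw] at hi; simp at hi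
      · exact ⟨w, hw⟩
  have e4 : ((i + 1, (999999 : Int)) ∈ ps) ↔ ((i + 1, (999999 : Int)) ∈ p :: ps) := by
    simp only [List.mem_cons]
    constructor
    · exact Or.inr
    · rintro (h | h)
      · exfalso; rw [← h] at hi; simp at hi
      · exact h
  unfold pvClause
  rw [e1, e2, e3, e4]

-- at the head row p.1 of ps, when p does not continue the previous group,
-- the clause's second half decides survival

theorem pv_not_clause_head (p : Int × Int) (ps : List (Int × Int)) (last : Int)
    (hps : (p :: ps).Pairwise (fun a b => a.1 < b.1))
    (hgt : ∀ q ∈ p :: ps, last < q.1)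
    (hnc : ¬(p.1 - last = 1 ∧ p.2 ≠ 999999)) :
    (¬ pvClause last p.1 (p :: ps)) ↔ pvCont p.1 ps := by
  have hmin : ∀ x w, (x, w) ∈ ps → p.1 < x := fun x w hx => pv_head_min hps hx
  have hss : (¬(p.1 - 1 = last ∨ ∃ w, (p.1 - 1, w) ∈ p :: ps) ∨ (p.1, (999999 : Int)) ∈ p :: ps) := by
    by_cases h9 : p.2 = 999999
    · right
      have : (p.1, p.2) = p := rfl
      rw [← h9, this]
      exact List.mem_cons_self
    · left
      rintro (h | ⟨w, hw⟩)
      · exact hnc ⟨by omega, h9⟩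
      · rcases List.mem_cons.mp hw with hw | hw
        · have := congrArg Prod.fst hw; simp at this
        · have := hmin _ _ hw; omega
  have hse : (¬(∃ w, (p.1 + 1, w) ∈ p :: ps) ∨ (p.1 + 1, (999999 : Int)) ∈ p :: ps)
      ↔ ¬ pvCont p.1 ps := by
    rw [← pv_notSE_iff_cont p ps hps]
    have m1 : (∃ w, (p.1 + 1, w) ∈ p :: ps) ↔ (∃ w, (p.1 + 1, w) ∈ ps) := by
      simp only [List.mem_cons]
      constructor
      · rintro ⟨w, hw | hw⟩
        · exfalso
          have := congrArg Prod.fst hw; simp at this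
        · exact ⟨w, hw⟩
      · rintro ⟨w, hw⟩; exact ⟨w, Or.inr hw⟩
    have m2 : ((p.1 + 1, (999999 : Int)) ∈ p :: ps) ↔ ((p.1 + 1, (999999 : Int)) ∈ ps) := by
      simp only [List.mem_cons]
      constructor
      · rintro (h | h)
        · exfalso
          have := congrArg Prod.fst h; simp at this
        · exact h
      · exact Or.inr
    rw [m1, m2]
    tauto
  unfold pvClause
  constructor
  · intro h
    by_contra hcont
    exact h ⟨hss, by rw [hse]; exact hcont⟩
  · intro hcont h
    exact (hse.mp h.2) hcont

theorem pv_mem_kept_aux (ps : List (Int × Int)) : ∀ (cur : List Int) (last : Int),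
    cur ≠ [] → ps.Pairwise (fun a b => a.1 < b.1) → (∀ p ∈ ps, last < p.1) →
    ∀ i : Int,
    (i ∈ ((pvSegs cur last ps).filter (fun c => c.length ≠ 1)).flatten ↔
      ((i ∈ cur ∧ (2 ≤ cur.length ∨ pvCont last ps))
       ∨ ((∃ v, (i, v) ∈ ps) ∧ ¬ pvClause last i ps))) := by
  induction ps with
  | nil =>
    intro cur last hcur _ _ i
    have hlen : 1 ≤ cur.length := List.length_pos_of_ne_nil hcur
    show i ∈ (([cur]).filter (fun c => c.length ≠ 1)).flatten ↔ _
    by_cases h : cur.length = 1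
    · simp [List.filter_cons, pvCont, h]
    · have h2 : 2 ≤ cur.length := by omega
      simp [List.filter_cons, pvCont, h, h2]
  | cons p ps ih =>
    intro cur last hcur hpw hgt i
    have hpwt : ps.Pairwise (fun a b => a.1 < b.1) := (List.pairwise_cons.mp hpw).2
    have hgtp : ∀ q ∈ ps, p.1 < q.1 := fun q hq => (List.pairwise_cons.mp hpw).1 q hq
    have hlastp : last < p.1 := hgt p List.mem_cons_self
    by_cases hc : p.1 - last = 1 ∧ p.2 ≠ 999999
    · rw [pvSegs, if_pos hc]
      rw [ih (cur ++ [p.1]) p.1 (by simp) hpwt hgtp i]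
      have hlen2 : 2 ≤ (cur ++ [p.1]).length := by
        have := List.length_pos_of_ne_nil hcur; simp; omega
      have hcont : pvCont last (p :: ps) := ⟨by omega, hc.2⟩
      constructor
      · rintro (⟨hmem, -⟩ | ⟨⟨v, hv⟩, hncl⟩)
        · rcases List.mem_append.mp hmem with h | h
          · exact Or.inl ⟨h, Or.inr hcont⟩
          · -- i = p.1 : head row, continues, hence survives and the clause fails
            simp only [List.mem_singleton] at h
            subst h
            refine Or.inr ⟨⟨p.2, List.mem_cons_self⟩, ?_⟩
            intro hcl
            rcases hcl.1 with h1 | h1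
            · exact h1 (Or.inl (by omega))
            · rcases List.mem_cons.mp h1 with h1 | h1
              · exact hc.2 (by have := congrArg Prod.snd h1; simpa using this.symm)
              · have := hgtp _ h1; simp at this
        · have hi : p.1 < i := pv_head_min hpw hv
          exact Or.inr ⟨⟨v, List.mem_cons_of_mem _ hv⟩,
            fun hcl => hncl ((pv_clause_shift p ps last i hpw (by omega) hi).mpr hcl)⟩
      · rintro (⟨hmem, -⟩ | ⟨⟨v, hv⟩, hncl⟩)
        · exact Or.inl ⟨List.mem_append_left _ hmem, Or.inl hlen2⟩
        · rcases List.mem_cons.mp hv with hv | hv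
          · -- i = p.1
            have hi1 : i = p.1 := by have := congrArg Prod.fst hv; simpa using this
            exact Or.inl ⟨List.mem_append_right _ (by simp [hi1]), Or.inl hlen2⟩
          · have hi : p.1 < i := pv_head_min hpw hv
            exact Or.inr ⟨⟨v, hv⟩,
              fun hcl => hncl ((pv_clause_shift p ps last i hpw (by omega) hi).mp hcl)⟩
    · rw [pvSegs, if_neg hc]
      have hstep : ((cur :: pvSegs [p.1] p.1 ps).filter (fun c => c.length ≠ 1)).flatten
          = (if cur.length ≠ 1 then cur else []) ++
            ((pvSegs [p.1] p.1 ps).filter (fun c => c.length ≠ 1)).flatten := by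
        by_cases h : cur.length = 1 <;> simp [List.filter, h]
      rw [hstep]
      have hIH := ih [p.1] p.1 (by simp) hpwt hgtp i
      have hnch := pv_not_clause_head p ps last hpw hgt hc
      have hlen : 1 ≤ cur.length := List.length_pos_of_ne_nil hcur
      constructor
      · intro hmem
        rcases List.mem_append.mp hmem with h | h
        · by_cases h1 : cur.length = 1
          · simp [h1] at h
          · exact Or.inl ⟨by simpa [h1] using h, Or.inl (by omega)⟩
        · rcases (hIH.mp h) with ⟨hm, hcont⟩ | ⟨⟨v, hv⟩, hncl⟩
          · -- i = p.1, survives because its own group gets extended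
            simp only [List.mem_singleton] at hm
            subst hm
            rcases hcont with h2 | hcont
            · simp at h2
            · exact Or.inr ⟨⟨p.2, List.mem_cons_self⟩, hnch.mpr hcont⟩
          · have hi : p.1 < i := pv_head_min hpw hv
            exact Or.inr ⟨⟨v, List.mem_cons_of_mem _ hv⟩,
              fun hcl => hncl ((pv_clause_shift p ps last i hpw (by omega) hi).mpr hcl)⟩
      · rintro (⟨hmem, hdisj⟩ | ⟨⟨v, hv⟩, hncl⟩)
        · rcases hdisj with h2 | hcont
          · apply List.mem_append_left
            simp only [ne_eq, if_pos (by omega : ¬ cur.length = 1)]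
            exact hmem
          · exact absurd hcont (by simp [pvCont]; intro h; omega)
        · apply List.mem_append_right
          rcases List.mem_cons.mp hv with hv | hv
          · have hi1 : i = p.1 := by have := congrArg Prod.fst hv; simpa using this
            subst hi1
            exact hIH.mpr (Or.inl ⟨List.mem_singleton_self _, Or.inr (hnch.mp hncl)⟩)
          · have hi : p.1 < i := pv_head_min hpw hv
            exact hIH.mpr (Or.inr ⟨⟨v, hv⟩,
              fun hcl => hncl ((pv_clause_shift p ps last i hpw (by omega) hi).mp hcl)⟩)

def pvClauseTop (i : Int) (ps : List (Int × Int)) : Prop := pvClause (i - 2) i ps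

theorem pv_mem_kept (ps : List (Int × Int))
    (hps : ps.Pairwise (fun a b => a.1 < b.1)) (i : Int) :
    i ∈ pvKept ps ↔ ((∃ v, (i, v) ∈ ps) ∧ ¬ pvClauseTop i ps) := by
  cases ps with
  | nil => simp [pvKept]
  | cons p rest =>
    have hpwt := (List.pairwise_cons.mp hps).2
    have hgtp : ∀ q ∈ rest, p.1 < q.1 := (List.pairwise_cons.mp hps).1
    have hgt2 : ∀ q ∈ p :: rest, p.1 - 2 < q.1 := by
      intro q hq
      rcases List.mem_cons.mp hq with h | h
      · rw [h]; omega
      · have := hgtp q h; omega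
    have hnch := pv_not_clause_head p rest (p.1 - 2) hps hgt2 (by omega)
    have h := pv_mem_kept_aux rest [p.1] p.1 (by simp) hpwt hgtp i
    show i ∈ ((pvSegs [p.1] p.1 rest).filter (fun c => c.length ≠ 1)).flatten ↔ _
    rw [h]
    constructor
    · rintro (⟨hm, hdisj⟩ | ⟨⟨v, hv⟩, hncl⟩)
      · simp only [List.mem_singleton] at hm
        subst hm
        rcases hdisj with h2 | hcont
        · simp at h2
        · exact ⟨⟨p.2, List.mem_cons_self⟩, hnch.mpr hcont⟩
      · have hi : p.1 < i := pv_head_min hps hv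
        refine ⟨⟨v, List.mem_cons_of_mem _ hv⟩, ?_⟩
        intro hcl
        exact hncl ((pv_clause_shift p rest (i - 2) i hps (by omega) hi).mpr hcl)
    · rintro ⟨⟨v, hv⟩, hncl⟩
      rcases List.mem_cons.mp hv with hv | hv
      · have hi1 : i = p.1 := by have := congrArg Prod.fst hv; simpa using this
        subst hi1
        exact Or.inl ⟨List.mem_singleton_self _, Or.inr (hnch.mp hncl)⟩
      · have hi : p.1 < i := pv_head_min hps hv
        exact Or.inr ⟨⟨v, hv⟩,
          fun hcl => hncl ((pv_clause_shift p rest (i - 2) i hps (by omega) hi).mp hcl)⟩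

def pvVal (l : List String) (k : Nat) : Option Int := (l.map PySem.Int.ofStr?).getD k none

theorem pv_window_len (l : List String) :
    ((none :: l.map PySem.Int.ofStr? ++ [none]).zip
      ((none :: l.map PySem.Int.ofStr? ++ [none]).tail.zip
        (none :: l.map PySem.Int.ofStr? ++ [none]).tail.tail)).length = l.length := by
  simp [List.length_zip]
  omega

theorem pv_window_getElem (l : List String) (k : Nat) (hk : k < l.length) :
    ((none :: l.map PySem.Int.ofStr? ++ [none]).zip
      ((none :: l.map PySem.Int.ofStr? ++ [none]).tail.zip
        (none :: l.map PySem.Int.ofStr? ++ [none]).tail.tail))[k]'(by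
          rw [pv_window_len]; exact hk)
    = ((if k = 0 then none else pvVal l (k-1)), (pvVal l k, pvVal l (k+1))) := by
  unfold pvVal
  rw [List.getElem_zip, List.getElem_zip, List.getElem_tail, List.getElem_tail]
  refine congrArg₂ Prod.mk ?_ (congrArg₂ Prod.mk ?_ ?_)
  · cases k with
    | zero => simp
    | succ j =>
      simp only [List.getElem_cons_succ, if_neg (Nat.succ_ne_zero j), Nat.add_sub_cancel]
      rw [List.getElem_append_left (by simp; omega)]
      exact (List.getD_eq_getElem _ none (by simp; omega)).symm
  · rw [List.getElem_append_left (as := none :: List.map PySem.Int.ofStr? l) (i := k+1)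
      (by simp; omega)]
    rw [List.getElem_cons_succ]
    exact (List.getD_eq_getElem _ none (by simpa using hk)).symm
  · rw [List.getElem_tail]
    by_cases h : k + 1 < l.length
    · rw [List.getElem_append_left (as := none :: List.map PySem.Int.ofStr? l) (i := k+1+1)
        (by simp; omega)]
      rw [List.getElem_cons_succ]
      exact (List.getD_eq_getElem _ none (by simpa using h)).symm
    · rw [List.getElem_append_right (as := none :: List.map PySem.Int.ofStr? l) (i := k+1+1)
        (by simp; omega)]
      simp only [List.getElem_singleton]
      exact (List.getD_eq_default _ none (by simp; omega)).symm

theorem pv_D_iff (l : List String) :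
    D_remove_list_of_numbers l
    ↔ (∃ k : Nat, k < l.length ∧ (pvVal l k).isSome = true ∧
        ((k = 0 ∨ pvVal l (k-1) = none) ∨ pvVal l k = some 999999) ∧
        (pvVal l (k+1) = none ∨ pvVal l (k+1) = some 999999) ∧
        (¬(k = 0 ∨ pvVal l (k-1) = none) ∨ pvVal l (k+1) ≠ none)) := by
  unfold D_remove_list_of_numbers
  constructor
  · rintro ⟨t, ht, hc⟩
    rw [List.mem_iff_getElem] at ht
    obtain ⟨k, hk, hkt⟩ := ht
    have hkn : k < l.length := by rw [pv_window_len] at hk; exact hk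
    rw [pv_window_getElem l k hkn] at hkt
    subst hkt
    dsimp only at hc
    refine ⟨k, hkn, ?_⟩
    by_cases hP : (if k = 0 then none else pvVal l (k-1) : Option Int) = none
    · rw [if_pos hP] at hc
      obtain ⟨hb, hc9⟩ := hc
      have hPor : k = 0 ∨ pvVal l (k-1) = none := by
        by_cases hk0 : k = 0
        · exact Or.inl hk0
        · rw [if_neg hk0] at hP; exact Or.inr hP
      exact ⟨hb, Or.inl hPor, Or.inr hc9, Or.inr (by simp [hc9])⟩
    · rw [if_neg hP] at hc
      obtain ⟨hb9, hcg⟩ := hc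
      have hnP : ¬(k = 0 ∨ pvVal l (k-1) = none) := by
        intro h
        apply hP
        rcases h with h | h
        · rw [if_pos h]
        · by_cases hk0 : k = 0
          · rw [if_pos hk0]
          · rw [if_neg hk0]; exact h
      have hc' : pvVal l (k+1) = none ∨ pvVal l (k+1) = some 999999 := by
        cases hcv : pvVal l (k+1) with
        | none => exact Or.inl rfl
        | some x =>
          right
          rw [hcv] at hcg
          simp only [Option.getD_some] at hcg
          rw [hcg]
      exact ⟨by rw [hb9]; rfl, Or.inr hb9, hc', Or.inl hnP⟩
  · rintro ⟨k, hkn, h1, h2, h3, h4⟩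
    refine ⟨((if k = 0 then none else pvVal l (k-1)), (pvVal l k, pvVal l (k+1))),
      ?_, ?_⟩
    · rw [List.mem_iff_getElem]
      exact ⟨k, by rw [pv_window_len]; exact hkn, pv_window_getElem l k hkn⟩
    · dsimp only
      by_cases hP : (if k = 0 then none else pvVal l (k-1) : Option Int) = none
      · rw [if_pos hP]
        refine ⟨h1, ?_⟩
        have hPor : k = 0 ∨ pvVal l (k-1) = none := by
          by_cases hk0 : k = 0
          · exact Or.inl hk0
          · rw [if_neg hk0] at hP; exact Or.inr hP
        have hcne : pvVal l (k+1) ≠ none := by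
          rcases h4 with h | h
          · exact absurd hPor h
          · exact h
        rcases h3 with h | h
        · exact absurd h hcne
        · exact h
      · rw [if_neg hP]
        have hnP : ¬(k = 0 ∨ pvVal l (k-1) = none) := by
          intro h
          apply hP
          rcases h with h | h
          · rw [if_pos h]
          · by_cases hk0 : k = 0
            · rw [if_pos hk0]
            · rw [if_neg hk0]; exact h
        have hb9 : pvVal l k = some 999999 := by
          rcases h2 with h | h
          · exact absurd h hnP
          · exact h
        refine ⟨hb9, ?_⟩
        rcases h3 with h | h <;> rw [h] <;> rfl

theorem pv_val_lt (l : List String) (j : Nat) (h : (pvVal l j).isSome = true) :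
    j < l.length := by
  by_contra hj
  rw [pvVal, List.getD_eq_default _ none (by simp; omega)] at h
  cases h

-- pair membership at a Nat row

theorem pv_mem_pairs_nat (l : List String) (k : Nat) (v : Int) :
    (((k : Int), v) ∈ pvPairs l) ↔ pvVal l k = some v := by
  rw [mem_pvPairs]
  constructor
  · rintro ⟨k', hk', he, hv⟩
    have : k = k' := by simpa using he
    subst this
    rw [pvVal, List.getD_eq_getElem _ none (by simpa using hk')]
    simpa using hv
  · intro h
    by_cases hk : k < l.length
    · refine ⟨k, hk, by simp, ?_⟩
      rw [pvVal, List.getD_eq_getElem _ none (by simpa using hk)] at h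
      simpa using h
    · exfalso
      rw [pvVal, List.getD_eq_default _ none (by simpa using hk)] at h
      cases h

theorem pv_mem_pairs_pred (l : List String) (k : Nat) (v : Int) :
    ((((k : Int)) - 1, v) ∈ pvPairs l) ↔ (1 ≤ k ∧ pvVal l (k-1) = some v) := by
  by_cases h0 : k = 0
  · subst h0
    simp only [Nat.cast_zero, zero_sub]
    constructor
    · intro h
      exfalso
      rw [mem_pvPairs] at h
      obtain ⟨k', -, he, -⟩ := h
      simp at he
    · rintro ⟨h, -⟩; omega
  · have hcast : ((k : Int)) - 1 = ((k - 1 : Nat) : Int) := by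
      have : 1 ≤ k := Nat.one_le_iff_ne_zero.mpr h0
      push_cast [this]
      ring
    rw [hcast, pv_mem_pairs_nat]
    constructor
    · intro h; exact ⟨Nat.one_le_iff_ne_zero.mpr h0, h⟩
    · rintro ⟨-, h⟩; exact h

theorem pv_mem_pairs_succ (l : List String) (k : Nat) (v : Int) :
    ((((k : Int)) + 1, v) ∈ pvPairs l) ↔ pvVal l (k+1) = some v := by
  have hcast : ((k : Int)) + 1 = (((k + 1 : Nat)) : Int) := by push_cast; ring
  rw [hcast, pv_mem_pairs_nat]

theorem pv_fsts_pairwise (l : List String) :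
    ((pvPairs l).map (·.1)).Pairwise (· < ·) :=
  List.pairwise_map.mpr (pairwise_pvPairs l)

theorem pv_del_eq_kept (l : List String) :
    (pvGetConsecutiveIntRows l).items.foldl
      (fun (acc : List Int) kv =>
        if (PySem.Dict.getD kv.2 "rows" []).length = 1 then acc
        else acc ++ PySem.Dict.getD kv.2 "rows" []) []
    = pvKept (pvPairs l) := by
  rw [pvDelFold_eq]
  have hzip : (pvGetConsecutiveIntRows l) =
      ((pvPairs l ++ [((l.length : Int), 999999)]).foldl pvGStep
        ⟨PySem.Dict.empty, [], [], 1, none⟩).groups := by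
    show (((pvGetRowsWithIntegers (l ++ ["999999"])).1.zip
        (pvGetRowsWithIntegers (l ++ ["999999"])).2).foldl pvGStep
        ⟨PySem.Dict.empty, [], [], 1, none⟩).groups = _
    rw [getRows_eq]
    show ((((pvPairs (l ++ ["999999"])).map (·.1)).zip
      ((pvPairs (l ++ ["999999"])).map (·.2))).foldl pvGStep _).groups = _
    rw [zip_pvPairs, pvPairs_append_sentinel]
  rw [hzip, pvLoopTop_eq]
  cases h : pvPairs l with
  | nil => simp [pvKept]
  | cons p rest => simp [pvKept]

theorem pv_A_eq_keep (l : List String) :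
    remove_list_of_numbers l = pvKeep l (pvKept (pvPairs l)) := by
  show (if h : _ then _ else _) = _
  rw [pv_del_eq_kept]
  by_cases h : pvKept (pvPairs l) = []
  · rw [h]
    simp only [ne_eq, not_true_eq_false, if_false, pvKeep_nil]
    rfl
  · have hpw : (pvKept (pvPairs l)).Pairwise (· < ·) :=
      List.Pairwise.sublist (pvKept_sublist (pvPairs l)) (pv_fsts_pairwise l)
    have hbd : ∀ i ∈ pvKept (pvPairs l), ∃ k : Nat, i = (k : Int) ∧ k < l.length := by
      intro i hi
      have : i ∈ (pvPairs l).map (·.1) := (pvKept_sublist (pvPairs l)).mem hi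
      obtain ⟨p, hp, hp1⟩ := List.mem_map.mp this
      obtain ⟨q1, q2⟩ := p
      rw [mem_pvPairs] at hp
      obtain ⟨k, hk, he, -⟩ := hp
      exact ⟨k, by simp at he hp1; omega, hk⟩
    have hsorted : PySem.List.sorted (pvKept (pvPairs l)) (fun x => x) false
        = pvKept (pvPairs l) :=
      PySem.List.sorted_eq_of_perm_of_pairwise_lt _ _ _ (List.Perm.refl _) hpw
    simp only [ne_eq, h, not_false_eq_true, if_true, hsorted]
    exact pvDelLoop_eq _ l hpw hbd

theorem pv_flag (l : List String) (j : Nat) :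
    (l.map (fun s => (PySem.Int.ofStr? s).isSome)).getD j false = (pvVal l j).isSome := by
  by_cases h : j < l.length
  · rw [List.getD_eq_getElem _ false (by simpa using h),
      pvVal, List.getD_eq_getElem _ none (by simpa using h)]
    simp
  · rw [List.getD_eq_default _ false (by simp; omega),
      pvVal, List.getD_eq_default _ none (by simp; omega)]
    rfl

-- the survival condition, outside the exact region

theorem pv_cond_iff (l : List String)
    (hnD : ¬ D_remove_list_of_numbers l)
    (k : Nat) (hk : k < l.length) :
    ((k : Int) ∈ pvKept (pvPairs l) ↔
      ((pvVal l k).isSome = true ∧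
        ((0 < k ∧ (pvVal l (k-1)).isSome = true)
          ∨ (k + 1 < l.length ∧ (pvVal l (k+1)).isSome = true)))) := by
  rw [pv_mem_kept (pvPairs l) (pairwise_pvPairs l)]
  rw [pv_D_iff] at hnD
  push_neg at hnD
  have hex : (∃ v, ((k : Int), v) ∈ pvPairs l) ↔ (pvVal l k).isSome = true := by
    constructor
    · rintro ⟨v, hv⟩; rw [pv_mem_pairs_nat] at hv; rw [hv]; rfl
    · intro h
      obtain ⟨v, hv⟩ := Option.isSome_iff_exists.mp h
      exact ⟨v, (pv_mem_pairs_nat l k v).mpr hv⟩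
  constructor
  · rintro ⟨hsome, hncl⟩
    refine ⟨hex.mp hsome, ?_⟩
    unfold pvClauseTop pvClause at hncl
    rw [not_and_or] at hncl
    rcases hncl with h | h
    · rw [not_or, not_not] at h
      obtain ⟨hpred, -⟩ := h
      rcases hpred with h1 | ⟨w, hw⟩
      · omega
      · rw [pv_mem_pairs_pred] at hw
        exact Or.inl ⟨by omega, by rw [hw.2]; rfl⟩
    · rw [not_or, not_not] at h
      obtain ⟨⟨w, hw⟩, -⟩ := h
      rw [pv_mem_pairs_succ] at hw
      have : (pvVal l (k+1)).isSome = true := by rw [hw]; rfl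
      exact Or.inr ⟨pv_val_lt l (k+1) this, this⟩
  · rintro ⟨hsome, hnb⟩
    refine ⟨hex.mpr hsome, ?_⟩
    intro hcl
    obtain ⟨hss, hse⟩ := hcl
    have hssD : (k = 0 ∨ pvVal l (k-1) = none) ∨ pvVal l k = some 999999 := by
      rcases hss with h | h
      · rw [not_or] at h
        obtain ⟨-, hnp⟩ := h
        left
        by_cases h0 : k = 0
        · exact Or.inl h0
        · right
          rw [Option.eq_none_iff_forall_ne_some]
          intro v hv
          exact hnp ⟨v, (pv_mem_pairs_pred l k v).mpr ⟨by omega, hv⟩⟩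
      · right
        rw [← pv_mem_pairs_nat]; exact h
    have hseD : pvVal l (k+1) = none ∨ pvVal l (k+1) = some 999999 := by
      rcases hse with h | h
      · left
        rw [Option.eq_none_iff_forall_ne_some]
        intro v hv
        exact h ⟨v, (pv_mem_pairs_succ l k v).mpr hv⟩
      · right
        rw [← pv_mem_pairs_succ]; exact h
    obtain ⟨hA, hB⟩ := hnD k hk hsome hssD hseD
    rcases hnb with ⟨h0, hs⟩ | ⟨h1, hs⟩
    · rcases hA with h | h
      · omega
      · rw [h] at hs; cases hs
    · rw [hB] at hs; cases hs

theorem pv_main (l : List String)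
    (hnD : ¬ D_remove_list_of_numbers l) :
    remove_list_of_numbers l = remove_list_of_numbers_alt l := by
  rw [pv_A_eq_keep]
  show pvKeep l (pvKept (pvPairs l))
      = (List.range (l.map (fun s => (PySem.Int.ofStr? s).isSome)).length).filterMap _
  unfold pvKeep
  rw [List.length_map]
  apply List.filterMap_congr
  intro k hk
  rw [List.mem_range] at hk
  refine if_congr ?_ rfl rfl
  rw [pv_cond_iff l hnD k hk]
  simp only [List.length_map, pv_flag]

-- machinery for the tightness theorem: A's deletion set is strictly contained in B's inside D_

theorem pv_length_filterMap {α β : Type} (f : α → Option β) (L : List α) :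
    (L.filterMap f).length = L.countP (fun a => (f a).isSome) := by
  induction L with
  | nil => rfl
  | cons a L ih => cases h : f a <;> simp [List.filterMap_cons, List.countP_cons, h, ih]

theorem pv_countP_lt {α : Type} (p q : α → Bool) (L : List α)
    (h : ∀ a ∈ L, p a = true → q a = true) (a0 : α) (ha : a0 ∈ L)
    (hq : q a0 = true) (hp : p a0 = false) : L.countP p < L.countP q := by
  induction L with
  | nil => cases ha
  | cons b L ih =>
    rw [List.countP_cons, List.countP_cons]
    rcases List.mem_cons.mp ha with rfl | ha'
    · have hle : L.countP p ≤ L.countP q :=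
        List.countP_mono_left (fun x hx => h x (List.mem_cons_of_mem _ hx))
      simp only [hp, hq]
      simp
      omega
    · have hlt := ih (fun x hx hx2 => h x (List.mem_cons_of_mem _ hx) hx2) ha'
      have hpq := h b List.mem_cons_self
      by_cases hbp : p b = true
      · rw [hbp, hpq hbp]; omega
      · rw [Bool.not_eq_true] at hbp
        rw [hbp]
        have hone : (if (q b : Bool) = true then 1 else 0) = 1 ∨
            (if (q b : Bool) = true then 1 else 0) = 0 := by
          by_cases hqb : q b = true <;> simp [hqb]
        rcases hone with h1 | h1 <;> rw [h1] <;> simp <;> omega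

theorem pv_del_sub (l : List String) (k : Nat) (h : (k : Int) ∈ pvKept (pvPairs l)) :
    (pvVal l k).isSome = true ∧
      ((0 < k ∧ (pvVal l (k-1)).isSome = true)
        ∨ (k + 1 < l.length ∧ (pvVal l (k+1)).isSome = true)) := by
  rw [pv_mem_kept _ (pairwise_pvPairs l)] at h
  obtain ⟨⟨v, hv⟩, hncl⟩ := h
  have hsome : (pvVal l k).isSome = true := by
    rw [(pv_mem_pairs_nat l k v).mp hv]; rfl
  refine ⟨hsome, ?_⟩
  unfold pvClauseTop pvClause at hncl
  rw [not_and_or] at hncl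
  rcases hncl with h | h
  · rw [not_or, not_not] at h
    obtain ⟨hpred, -⟩ := h
    rcases hpred with h1 | ⟨w, hw⟩
    · exfalso; omega
    · rw [pv_mem_pairs_pred] at hw
      exact Or.inl ⟨by omega, by rw [hw.2]; rfl⟩
  · rw [not_or, not_not] at h
    obtain ⟨⟨w, hw⟩, -⟩ := h
    rw [pv_mem_pairs_succ] at hw
    have hs : (pvVal l (k+1)).isSome = true := by rw [hw]; rfl
    exact Or.inr ⟨pv_val_lt l (k+1) hs, hs⟩

theorem pv_keep_len (l : List String) (d : List Int) :
    (pvKeep l d).length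
      = (List.range l.length).countP (fun j : Nat => !decide ((j : Int) ∈ d)) := by
  unfold pvKeep
  rw [pv_length_filterMap]
  apply List.countP_congr
  intro j hj
  rw [List.mem_range] at hj
  by_cases hm : (j : Int) ∈ d
  · simp [hm]
  · simp [hm, hj]

theorem pv_B_eq_filterMap (l : List String) :
    remove_list_of_numbers_alt l = (List.range l.length).filterMap
      (fun j => if (pvVal l j).isSome = true ∧
          ((0 < j ∧ (pvVal l (j-1)).isSome = true)
            ∨ (j + 1 < l.length ∧ (pvVal l (j+1)).isSome = true))
        then none else l[j]?) := by
  show (List.range (l.map (fun s => (PySem.Int.ofStr? s).isSome)).length).filterMap (fun i =>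
      if (l.map (fun s => (PySem.Int.ofStr? s).isSome)).getD i false ∧
         ((0 < i ∧ (l.map (fun s => (PySem.Int.ofStr? s).isSome)).getD (i - 1) false)
          ∨ (i + 1 < (l.map (fun s => (PySem.Int.ofStr? s).isSome)).length ∧
             (l.map (fun s => (PySem.Int.ofStr? s).isSome)).getD (i + 1) false))
      then none else l[i]?) = _
  rw [List.length_map]
  apply List.filterMap_congr
  intro j hj
  rw [List.mem_range] at hj
  refine if_congr ?_ rfl rfl
  rw [pv_flag, pv_flag, pv_flag]

theorem pv_alt_len (l : List String) :
    (remove_list_of_numbers_alt l).length = (List.range l.length).countP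
      (fun j => !decide ((pvVal l j).isSome = true ∧
        ((0 < j ∧ (pvVal l (j-1)).isSome = true)
          ∨ (j + 1 < l.length ∧ (pvVal l (j+1)).isSome = true)))) := by
  rw [pv_B_eq_filterMap, pv_length_filterMap]
  apply List.countP_congr
  intro j hj
  rw [List.mem_range] at hj
  by_cases hc : (pvVal l j).isSome = true ∧
      ((0 < j ∧ (pvVal l (j-1)).isSome = true)
        ∨ (j + 1 < l.length ∧ (pvVal l (j+1)).isSome = true))
  · simp [hc]
  · simp [hc, hj]

theorem pv_tight (l : List String) (hD : D_remove_list_of_numbers l) :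
    remove_list_of_numbers l ≠ remove_list_of_numbers_alt l := by
  rw [pv_D_iff] at hD
  obtain ⟨k, hk, hb, h2, h3, h4⟩ := hD
  intro hEq
  have hknot : ¬ ((k : Int) ∈ pvKept (pvPairs l)) := by
    rw [pv_mem_kept _ (pairwise_pvPairs l)]
    rintro ⟨-, hncl⟩
    apply hncl
    unfold pvClauseTop pvClause
    refine ⟨?_, ?_⟩
    · rcases h2 with hP | hb9
      · left
        rintro (habs | ⟨w, hw⟩)
        · omega
        · rw [pv_mem_pairs_pred] at hw
          rcases hP with hk0 | hanone
          · omega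
          · rw [hanone] at hw
            cases hw.2
      · exact Or.inr ((pv_mem_pairs_nat l k 999999).mpr hb9)
    · rcases h3 with hcn | hc9
      · left
        rintro ⟨w, hw⟩
        rw [pv_mem_pairs_succ] at hw
        rw [hcn] at hw
        cases hw
      · exact Or.inr ((pv_mem_pairs_succ l k 999999).mpr hc9)
  have hcondB : (pvVal l k).isSome = true ∧
      ((0 < k ∧ (pvVal l (k-1)).isSome = true)
        ∨ (k + 1 < l.length ∧ (pvVal l (k+1)).isSome = true)) := by
    refine ⟨hb, ?_⟩
    by_cases hP : k = 0 ∨ pvVal l (k-1) = none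
    · have hcne : pvVal l (k+1) ≠ none := by
        rcases h4 with h | h
        · exact absurd hP h
        · exact h
      have hcs : (pvVal l (k+1)).isSome = true := Option.isSome_iff_ne_none.mpr hcne
      exact Or.inr ⟨pv_val_lt l (k+1) hcs, hcs⟩
    · push_neg at hP
      exact Or.inl ⟨Nat.pos_of_ne_zero hP.1, Option.isSome_iff_ne_none.mpr hP.2⟩
  have hlenEq := congrArg List.length hEq
  rw [pv_A_eq_keep, pv_keep_len, pv_alt_len] at hlenEq
  have hlt := pv_countP_lt
    (fun j => !decide ((pvVal l j).isSome = true ∧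
      ((0 < j ∧ (pvVal l (j-1)).isSome = true)
        ∨ (j + 1 < l.length ∧ (pvVal l (j+1)).isSome = true))))
    (fun j : Nat => !decide ((j : Int) ∈ pvKept (pvPairs l)))
    (List.range l.length)
    (by
      intro j hj hpj
      simp only [Bool.not_eq_true', decide_eq_false_iff_not] at hpj ⊢
      intro hmem
      exact hpj (pv_del_sub l j hmem))
    k (by rw [List.mem_range]; exact hk)
    (by simp only [Bool.not_eq_true', decide_eq_false_iff_not]; exact hknot)
    (by simp only [Bool.not_eq_false', decide_eq_true_iff]; exact hcondB)
  omega

-- ===== VERDICT (by name: the statement is the Claim_ definition above) =====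
theorem remove_list_of_numbers_spec : Claim_unchanged_remove_list_of_numbers := by
  intro doclist _hdom
  show ¬ D_remove_list_of_numbers doclist → _
  intro hnD
  exact pv_main doclist hnD

theorem remove_list_of_numbers_changed : Claim_changed_remove_list_of_numbers := by
  unfold Claim_changed_remove_list_of_numbers; decide

theorem remove_list_of_numbers_tight : Claim_exact_remove_list_of_numbers := by
  intro doclist _hdom hD
  exact pv_tight doclist hD
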